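-- pv_equiv track=rewrite | github.com/NickG123/AdventOfCode2024 | day22/day22.py | simulate_steps
-- ===== SOURCE A (Python) =====
-- from collections import defaultdict, deque
--
-- def simulate(secret: int) -> int:
--     secret = ((secret * 64) ^ secret) % 16777216
--     secret = ((secret // 32) ^ secret) % 16777216
--     return ((secret * 2048) ^ secret) % 16777216
--
-- def simulate_steps(secret: int, steps: int) -> tuple[int, dict[tuple[int, ...], int]]:
--     deltas = deque[int](maxlen=4)
--     sequences = {}
--     for _ in range(steps):
--         new_secret = simulate(secret)
--         price_delta = (new_secret % 10) - (secret % 10)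
--         deltas.append(price_delta)
--         if len(deltas) == 4:
--             sequence = tuple(deltas)
--             if sequence not in sequences:
--                 sequences[sequence] = new_secret % 10
--         secret = new_secret
--     return secret, sequences
-- ===== SOURCE B (Python) =====
-- def simulate(secret: int) -> int:
--     secret = ((secret * 64) ^ secret) % 16777216
--     secret = ((secret // 32) ^ secret) % 16777216
--     return ((secret * 2048) ^ secret) % 16777216
--
--
-- def simulate_steps(secret: int, steps: int) -> tuple[int, dict[tuple[int, ...], int]]:
--     # pass 1: generate every price up front
--     prices = [secret % 10]
--     s = secret
--     for _ in range(steps):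
--         s = simulate(s)
--         prices.append(s % 10)
--     # pass 2: slide a 4-delta window over the precomputed prices
--     deltas = [q - p for p, q in zip(prices, prices[1:])]
--     sequences = {}
--     for key, price in zip(zip(deltas, deltas[1:], deltas[2:], deltas[3:]), prices[4:]):
--         sequences.setdefault(key, price)
--     return s, sequences
-- ===== Notes on version B (the rewrite author's own statement) =====
-- stated objective: alternative
-- what changed: Replaces A's single pass with a rolling 4-deque and in-loop dict updates by a two-pass generate-then-window structure: first generate all prices, then build the delta list and fill the dict by zipping four shifted delta slices with the prices, setdefault keeping the first occurrence.
import Mathlib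
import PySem

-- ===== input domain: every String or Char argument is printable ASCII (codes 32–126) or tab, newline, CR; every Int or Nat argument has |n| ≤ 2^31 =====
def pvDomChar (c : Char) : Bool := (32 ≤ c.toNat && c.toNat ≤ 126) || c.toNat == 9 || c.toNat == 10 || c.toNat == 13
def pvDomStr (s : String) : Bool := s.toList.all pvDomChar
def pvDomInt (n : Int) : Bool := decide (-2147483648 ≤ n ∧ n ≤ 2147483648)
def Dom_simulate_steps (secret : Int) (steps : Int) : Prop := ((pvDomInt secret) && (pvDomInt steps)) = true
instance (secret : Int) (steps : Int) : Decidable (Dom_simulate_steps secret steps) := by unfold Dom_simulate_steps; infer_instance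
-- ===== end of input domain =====

-- B replaces A's single rolling-deque pass by a two-pass generate-prices-then-window structure (objective: alternative decomposition, same cost).

-- ===== PORT A =====
-- helper simulate (same module)
def pySimulate (secret : Int) : Int :=
  let s1 := PySem.Int.mod (PySem.Int.bxor (secret * 64) secret) 16777216
  let s2 := PySem.Int.mod (PySem.Int.bxor (PySem.Int.floordiv s1 32) s1) 16777216
  PySem.Int.mod (PySem.Int.bxor (s2 * 2048) s2) 16777216

def simulate_steps (secret : Int) (steps : Int) : Int × (List (List Int × Int)) :=
  let final := (PySem.List.pyRange 0 steps 1).foldl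
    (fun (st : Int × List Int × PySem.Dict (List Int) Int) _ =>
      let new_secret := pySimulate st.1
      let price_delta := PySem.Int.mod new_secret 10 - PySem.Int.mod st.1 10
      -- deque(maxlen=4).append: drop the oldest element when full
      let deltas := if st.2.1.length == 4 then st.2.1.tail ++ [price_delta] else st.2.1 ++ [price_delta]
      let sequences := if deltas.length == 4 then
          (if (st.2.2.get? deltas).isNone then st.2.2.insert deltas (PySem.Int.mod new_secret 10) else st.2.2)
        else st.2.2
      (new_secret, deltas, sequences))
    (secret, [], PySem.Dict.empty)
  (final.1, final.2.2.items)

-- ===== PORT B =====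
def simulate_steps_alt (secret : Int) (steps : Int) : Int × (List (List Int × Int)) :=
  -- pass 1: generate every price up front
  let st := (PySem.List.pyRange 0 steps 1).foldl
    (fun (st : Int × List Int) _ =>
      let s := pySimulate st.1
      (s, st.2 ++ [PySem.Int.mod s 10]))
    (secret, [PySem.Int.mod secret 10])
  let s := st.1
  let prices := st.2
  -- pass 2: slide a 4-delta window over the precomputed prices
  let deltas := (List.zip prices (PySem.List.slice prices (some 1) none)).map (fun pq => pq.2 - pq.1)
  let sequences := (List.zip
      (List.zip deltas (List.zip (PySem.List.slice deltas (some 1) none)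
        (List.zip (PySem.List.slice deltas (some 2) none) (PySem.List.slice deltas (some 3) none))))
      (PySem.List.slice prices (some 4) none)).foldl
    (fun (d : PySem.Dict (List Int) Int) kp =>
      -- sequences.setdefault(key, price)
      if (d.get? [kp.1.1, kp.1.2.1, kp.1.2.2.1, kp.1.2.2.2]).isNone
      then d.insert [kp.1.1, kp.1.2.1, kp.1.2.2.1, kp.1.2.2.2] kp.2 else d)
    PySem.Dict.empty
  (s, sequences.items)

-- ===== PRECONDITION & SPEC =====
def Spec_simulate_steps (secret : Int) (steps : Int) (out : Int × (List (List Int × Int))) : Prop := out = simulate_steps_alt secret steps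
instance (secret : Int) (steps : Int) (out : Int × (List (List Int × Int))) : Decidable (Spec_simulate_steps secret steps out) := by unfold Spec_simulate_steps; infer_instance

-- ===== CLAIM (what is proved, stated in full; the proofs are below) =====
def Claim_equal_simulate_steps : Prop := ∀ (secret : Int) (steps : Int), Dom_simulate_steps secret steps → Spec_simulate_steps secret steps (simulate_steps secret steps)

-- ===== LEMMAS AND PROOFS =====

-- loop bodies as named step functions (definitionally equal to the ports' inline lambdas)
def stepA (st : Int × List Int × PySem.Dict (List Int) Int) : Int × List Int × PySem.Dict (List Int) Int :=
  let new_secret := pySimulate st.1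
  let price_delta := PySem.Int.mod new_secret 10 - PySem.Int.mod st.1 10
  let deltas := if st.2.1.length == 4 then st.2.1.tail ++ [price_delta] else st.2.1 ++ [price_delta]
  let sequences := if deltas.length == 4 then
      (if (st.2.2.get? deltas).isNone then st.2.2.insert deltas (PySem.Int.mod new_secret 10) else st.2.2)
    else st.2.2
  (new_secret, deltas, sequences)

def stepP (st : Int × List Int) : Int × List Int :=
  let s := pySimulate st.1
  (s, st.2 ++ [PySem.Int.mod s 10])

def bstep (d : PySem.Dict (List Int) Int) (kp : (Int × Int × Int × Int) × Int) : PySem.Dict (List Int) Int :=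
  if (d.get? [kp.1.1, kp.1.2.1, kp.1.2.2.1, kp.1.2.2.2]).isNone
  then d.insert [kp.1.1, kp.1.2.1, kp.1.2.2.1, kp.1.2.2.2] kp.2 else d

-- reference sequences
def secN (s : Int) : Nat → Int
  | 0 => s
  | n+1 => secN (pySimulate s) n

def dd (s : Int) : Int := PySem.Int.mod (pySimulate s) 10 - PySem.Int.mod s 10

def tp (s : Int) : Nat → List Int
  | 0 => []
  | n+1 => PySem.Int.mod (pySimulate s) 10 :: tp (pySimulate s) n

def pl (s : Int) (n : Nat) : List Int := PySem.Int.mod s 10 :: tp s n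

def dl (s : Int) : Nat → List Int
  | 0 => []
  | n+1 => dd s :: dl (pySimulate s) n

def rowsB (s : Int) : Nat → List ((Int × Int × Int × Int) × Int)
  | 0 => [] | 1 => [] | 2 => [] | 3 => []
  | n+4 => ((dd s, dd (pySimulate s), dd (pySimulate (pySimulate s)), dd (pySimulate (pySimulate (pySimulate s)))), PySem.Int.mod (pySimulate (pySimulate (pySimulate (pySimulate s)))) 10) :: rowsB (pySimulate s) (n+3)

def deltasOf (prices : List Int) : List Int :=
  (List.zip prices (PySem.List.slice prices (some 1) none)).map (fun pq => pq.2 - pq.1)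

def ABody (s : Int) (n : Nat) : Int × (List (List Int × Int)) :=
  ((stepA^[n] (s, [], PySem.Dict.empty)).1, (stepA^[n] (s, [], PySem.Dict.empty)).2.2.items)

def BBody (s : Int) (n : Nat) : Int × (List (List Int × Int)) :=
  ((stepP^[n] (s, [PySem.Int.mod s 10])).1,
   ((List.zip
      (List.zip (deltasOf (stepP^[n] (s, [PySem.Int.mod s 10])).2)
        (List.zip (PySem.List.slice (deltasOf (stepP^[n] (s, [PySem.Int.mod s 10])).2) (some 1) none)
          (List.zip (PySem.List.slice (deltasOf (stepP^[n] (s, [PySem.Int.mod s 10])).2) (some 2) none)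
            (PySem.List.slice (deltasOf (stepP^[n] (s, [PySem.Int.mod s 10])).2) (some 3) none))))
      (PySem.List.slice (stepP^[n] (s, [PySem.Int.mod s 10])).2 (some 4) none)).foldl bstep PySem.Dict.empty).items)

lemma foldl_ignore {α β : Type} (f : α → α) : ∀ (l : List β) (z : α), l.foldl (fun s _ => f s) z = f^[l.length] z := by
  intro l
  induction l with
  | nil => intro z; rfl
  | cons x xs ih => intro z; simp [List.foldl, ih, Function.iterate_succ_apply]

lemma portA_eq (secret steps : Int) : simulate_steps secret steps = ABody secret steps.toNat := by
  show (let final := (PySem.List.pyRange 0 steps 1).foldl (fun st _ => stepA st) (secret, [], PySem.Dict.empty);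
        (final.1, final.2.2.items)) = ABody secret steps.toNat
  rw [foldl_ignore, PySem.List.length_pyRange_one]
  simp [ABody]

lemma portB_eq (secret steps : Int) : simulate_steps_alt secret steps = BBody secret steps.toNat := by
  show (let st := (PySem.List.pyRange 0 steps 1).foldl (fun st _ => stepP st) (secret, [PySem.Int.mod secret 10]);
        let s := st.1
        let prices := st.2
        let deltas := (List.zip prices (PySem.List.slice prices (some 1) none)).map (fun pq => pq.2 - pq.1)
        let sequences := (List.zip
            (List.zip deltas (List.zip (PySem.List.slice deltas (some 1) none)
              (List.zip (PySem.List.slice deltas (some 2) none) (PySem.List.slice deltas (some 3) none))))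
            (PySem.List.slice prices (some 4) none)).foldl bstep PySem.Dict.empty
        (s, sequences.items)) = BBody secret steps.toNat
  rw [foldl_ignore, PySem.List.length_pyRange_one]
  simp [BBody, deltasOf]

-- pass 1 produces the price list
lemma stepP_iter : ∀ (n : Nat) (s : Int) (ps : List Int),
    stepP^[n] (s, ps) = (secN s n, ps ++ tp s n) := by
  intro n
  induction n with
  | zero => intro s ps; simp [secN, tp]
  | succ n ih =>
      intro s ps
      rw [Function.iterate_succ_apply]
      show stepP^[n] (pySimulate s, ps ++ [PySem.Int.mod (pySimulate s) 10]) = _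
      rw [ih]
      simp [secN, tp]

lemma stepA_sec : ∀ (n : Nat) (st : Int × List Int × PySem.Dict (List Int) Int),
    (stepA^[n] st).1 = secN st.1 n := by
  intro n
  induction n with
  | zero => intro st; simp [secN]
  | succ n ih =>
      intro st
      rw [Function.iterate_succ_apply, ih]
      simp [stepA, secN]

-- deltas computed from adjacent price pairs are the reference delta list
lemma deltas_eq : ∀ (n : Nat) (s : Int),
    (List.zip (pl s n) (tp s n)).map (fun pq => pq.2 - pq.1) = dl s n := by
  intro n
  induction n with
  | zero => intro s; simp [pl, tp, dl]
  | succ n ih =>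
      intro s
      show (List.zip (PySem.Int.mod s 10 :: pl (pySimulate s) n)
            (PySem.Int.mod (pySimulate s) 10 :: tp (pySimulate s) n)).map (fun pq => pq.2 - pq.1) = _
      simp only [List.zip_cons_cons, List.map_cons, ih]
      simp [dl, dd]

-- one zip step on an exposed 4-delta window
lemma zip_window (a0 a1 a2 a3 p4 : Int) (D T : List Int) :
    List.zip (List.zip (a0::a1::a2::a3::D) (List.zip (a1::a2::a3::D) (List.zip (a2::a3::D) (a3::D)))) (p4::T)
      = ((a0, a1, a2, a3), p4) :: List.zip (List.zip (a1::a2::a3::D) (List.zip (a2::a3::D) (List.zip (a3::D) D))) T := by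
  simp [List.zip_cons_cons]

-- the zipped windows are the reference row list
lemma rows_eq : ∀ (n : Nat) (s : Int),
    List.zip
      (List.zip (dl s n) (List.zip ((dl s n).drop 1) (List.zip ((dl s n).drop 2) ((dl s n).drop 3))))
      ((pl s n).drop 4) = rowsB s n := by
  intro n
  induction n using Nat.strong_induction_on with
  | h n ih =>
    match n, ih with
    | 0, _ => intro s; rfl
    | 1, _ => intro s; rfl
    | 2, _ => intro s; rfl
    | 3, _ => intro s; rfl
    | (m+4), ih =>
        intro s
        have Ed1 : (dl s (m+4)).drop 1 = dd (pySimulate s) :: dd (pySimulate (pySimulate s)) :: dd (pySimulate (pySimulate (pySimulate s))) :: dl (pySimulate (pySimulate (pySimulate (pySimulate s)))) m := rfl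
        have Ed2 : (dl s (m+4)).drop 2 = dd (pySimulate (pySimulate s)) :: dd (pySimulate (pySimulate (pySimulate s))) :: dl (pySimulate (pySimulate (pySimulate (pySimulate s)))) m := rfl
        have Ed3 : (dl s (m+4)).drop 3 = dd (pySimulate (pySimulate (pySimulate s))) :: dl (pySimulate (pySimulate (pySimulate (pySimulate s)))) m := rfl
        have Ep : (pl s (m+4)).drop 4 = PySem.Int.mod (pySimulate (pySimulate (pySimulate (pySimulate s)))) 10 :: tp (pySimulate (pySimulate (pySimulate (pySimulate s)))) m := rfl
        have E : dl s (m+4) = dd s :: dd (pySimulate s) :: dd (pySimulate (pySimulate s)) :: dd (pySimulate (pySimulate (pySimulate s))) :: dl (pySimulate (pySimulate (pySimulate (pySimulate s)))) m := rfl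
        rw [Ed1, Ed2, Ed3, Ep, E, zip_window]
        have Er : rowsB s (m+4)
            = ((dd s, dd (pySimulate s), dd (pySimulate (pySimulate s)), dd (pySimulate (pySimulate (pySimulate s)))), PySem.Int.mod (pySimulate (pySimulate (pySimulate (pySimulate s)))) 10) :: rowsB (pySimulate s) (m+3) := rfl
        rw [Er]
        congr 1
        have ihm := ih (m+3) (by omega) (pySimulate s)
        have F2 : (dl (pySimulate s) (m+3)).drop 1 = dd (pySimulate (pySimulate s)) :: dd (pySimulate (pySimulate (pySimulate s))) :: dl (pySimulate (pySimulate (pySimulate (pySimulate s)))) m := rfl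
        have F3 : (dl (pySimulate s) (m+3)).drop 2 = dd (pySimulate (pySimulate (pySimulate s))) :: dl (pySimulate (pySimulate (pySimulate (pySimulate s)))) m := rfl
        have F4 : (dl (pySimulate s) (m+3)).drop 3 = dl (pySimulate (pySimulate (pySimulate (pySimulate s)))) m := rfl
        have F5 : (pl (pySimulate s) (m+3)).drop 4 = tp (pySimulate (pySimulate (pySimulate (pySimulate s)))) m := rfl
        have F1 : dl (pySimulate s) (m+3) = dd (pySimulate s) :: dd (pySimulate (pySimulate s)) :: dd (pySimulate (pySimulate (pySimulate s))) :: dl (pySimulate (pySimulate (pySimulate (pySimulate s)))) m := rfl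
        rw [F2, F3, F4, F5, F1] at ihm
        exact ihm

-- full-window phase of A equals folding bstep over the remaining rows
lemma stepA_full : ∀ (m : Nat) (s : Int) (q : PySem.Dict (List Int) Int),
    (stepA^[m] ((pySimulate (pySimulate (pySimulate (pySimulate s)))), [dd s, dd (pySimulate s), dd (pySimulate (pySimulate s)), dd (pySimulate (pySimulate (pySimulate s)))], q)).2.2
      = List.foldl bstep q (rowsB (pySimulate s) (m+3)) := by
  intro m
  induction m with
  | zero => intro s q; rfl
  | succ m ih =>
      intro s q
      rw [Function.iterate_succ_apply]
      have hs : stepA ((pySimulate (pySimulate (pySimulate (pySimulate s)))), [dd s, dd (pySimulate s), dd (pySimulate (pySimulate s)), dd (pySimulate (pySimulate (pySimulate s)))], q)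
          = ((pySimulate (pySimulate (pySimulate (pySimulate (pySimulate s))))), [dd (pySimulate s), dd (pySimulate (pySimulate s)), dd (pySimulate (pySimulate (pySimulate s))), dd (pySimulate (pySimulate (pySimulate (pySimulate s))))],
             bstep q ((dd (pySimulate s), dd (pySimulate (pySimulate s)), dd (pySimulate (pySimulate (pySimulate s))), dd (pySimulate (pySimulate (pySimulate (pySimulate s))))), PySem.Int.mod (pySimulate (pySimulate (pySimulate (pySimulate (pySimulate s))))) 10)) := rfl
      rw [hs, ih (pySimulate s)]
      have hr : rowsB (pySimulate s) (m+1+3)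
          = ((dd (pySimulate s), dd (pySimulate (pySimulate s)), dd (pySimulate (pySimulate (pySimulate s))), dd (pySimulate (pySimulate (pySimulate (pySimulate s))))), PySem.Int.mod (pySimulate (pySimulate (pySimulate (pySimulate (pySimulate s))))) 10) :: rowsB (pySimulate (pySimulate s)) (m+3) := rfl
      rw [hr, List.foldl_cons]

lemma stepA_dict : ∀ (n : Nat) (s : Int),
    (stepA^[n] (s, [], PySem.Dict.empty)).2.2 = List.foldl bstep PySem.Dict.empty (rowsB s n) := by
  intro n s
  match n with
  | 0 => rfl
  | 1 => rfl
  | 2 => rfl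
  | 3 => rfl
  | (m+4) =>
      have h4 : stepA^[m+4] (s, [], PySem.Dict.empty) = stepA^[m] (stepA^[4] (s, [], PySem.Dict.empty)) := by
        rw [Function.iterate_add_apply]
      have h0 : stepA^[4] (s, [], PySem.Dict.empty)
          = ((pySimulate (pySimulate (pySimulate (pySimulate s)))), [dd s, dd (pySimulate s), dd (pySimulate (pySimulate s)), dd (pySimulate (pySimulate (pySimulate s)))],
             bstep PySem.Dict.empty ((dd s, dd (pySimulate s), dd (pySimulate (pySimulate s)), dd (pySimulate (pySimulate (pySimulate s)))), PySem.Int.mod (pySimulate (pySimulate (pySimulate (pySimulate s)))) 10)) := rfl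
      have hr : rowsB s (m+4)
          = ((dd s, dd (pySimulate s), dd (pySimulate (pySimulate s)), dd (pySimulate (pySimulate (pySimulate s)))), PySem.Int.mod (pySimulate (pySimulate (pySimulate (pySimulate s)))) 10) :: rowsB (pySimulate s) (m+3) := rfl
      rw [h4, h0, stepA_full, hr, List.foldl_cons]

lemma main_eq (s : Int) (n : Nat) : ABody s n = BBody s n := by
  unfold ABody BBody
  have hst : stepP^[n] (s, [PySem.Int.mod s 10]) = (secN s n, pl s n) := by
    rw [stepP_iter]; rfl
  rw [hst]
  dsimp only
  unfold deltasOf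
  have h1 : PySem.List.slice (pl s n) (some 1) none = tp s n := by
    rw [PySem.List.slice_from_one]; rfl
  rw [h1, deltas_eq]
  have h3 : PySem.List.slice (dl s n) (some 1) none = (dl s n).drop 1 := by
    rw [PySem.List.slice_from_one, List.drop_one]
  have h4 : PySem.List.slice (dl s n) (some 2) none = (dl s n).drop 2 := by
    rw [PySem.List.slice_from _ (by norm_num : (0:Int) ≤ 2)]; rfl
  have h5 : PySem.List.slice (dl s n) (some 3) none = (dl s n).drop 3 := by
    rw [PySem.List.slice_from _ (by norm_num : (0:Int) ≤ 3)]; rfl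
  have h6 : PySem.List.slice (pl s n) (some 4) none = (pl s n).drop 4 := by
    rw [PySem.List.slice_from _ (by norm_num : (0:Int) ≤ 4)]; rfl
  rw [h3, h4, h5, h6, rows_eq, stepA_sec, stepA_dict]

-- ===== VERDICT (by name: the statement is the Claim_ definition above) =====
theorem simulate_steps_spec : Claim_equal_simulate_steps := by
  intro secret steps _
  unfold Spec_simulate_steps
  rw [portA_eq, portB_eq, main_eq]
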